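-- pv_equiv track=rewrite | github.com/gregreen/bayestar | scripts/healtree.py | digits2loc
-- ===== SOURCE A (Python) =====
-- def digits2loc(digits):
--     """
--     Converts digits representing the nested location of
--     a HEALPix pixel to a nested (nside, index) specification.
--     """
--
--     idx = 0
--     nside = 1
--     mult = 1
--     for d in digits[::-1]:
--         idx += mult * d
--         nside *= 2
--         mult *= 4
--
--     nside //= 2
--
--     return (nside, idx)
-- ===== SOURCE B (Python) =====
-- def digits2loc(digits):
--     """
--     Converts digits representing the nested location of
--     a HEALPix pixel to a nested (nside, index) specification.
--     """
--     idx = 0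
--     for d in digits:
--         idx = idx * 4 + d
--     return (2 ** len(digits) // 2, idx)
-- ===== Notes on version B (the rewrite author's own statement) =====
-- stated objective: simpler
-- what changed: nside is computed by the closed form 2**len(digits)//2 instead of being accumulated in the loop, and idx is computed by a forward Horner pass (idx = idx*4 + d) over the digits in natural order instead of A's reversed loop with an explicit power-of-4 multiplier.
import Mathlib
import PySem

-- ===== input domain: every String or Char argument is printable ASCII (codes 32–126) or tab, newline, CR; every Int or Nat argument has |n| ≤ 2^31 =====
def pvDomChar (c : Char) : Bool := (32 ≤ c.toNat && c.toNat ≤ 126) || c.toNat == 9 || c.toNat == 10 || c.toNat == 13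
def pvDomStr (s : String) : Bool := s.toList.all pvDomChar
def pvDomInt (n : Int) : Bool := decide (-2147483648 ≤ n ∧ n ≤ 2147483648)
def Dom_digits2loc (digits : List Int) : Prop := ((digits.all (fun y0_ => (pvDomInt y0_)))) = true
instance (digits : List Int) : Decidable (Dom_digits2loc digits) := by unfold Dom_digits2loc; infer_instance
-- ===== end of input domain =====

-- B replaces A's fused reversed loop by a closed-form nside (2^len // 2) plus a forward
-- Horner accumulation of idx; objective: simpler.

-- ===== PORT A =====
-- digits[::-1] is ported as digits.reverse (exact); the loop carries (idx, nside, mult).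
def digits2loc (digits : List Int) : Int × Int :=
  let st := digits.reverse.foldl
    (fun (s : Int × Int × Int) d =>
      (s.1 + s.2.2 * d, s.2.1 * 2, s.2.2 * 4)) (0, 1, 1)
  (PySem.Int.floordiv st.2.1 2, st.1)

-- ===== PORT B =====
def digits2loc_alt (digits : List Int) : Int × Int :=
  let idx := digits.foldl (fun a d => a * 4 + d) 0
  (PySem.Int.floordiv (2 ^ digits.length) 2, idx)

-- ===== PRECONDITION & SPEC =====
def Spec_digits2loc (digits : List Int) (out : Int × Int) : Prop := out = digits2loc_alt digits
instance (digits : List Int) (out : Int × Int) : Decidable (Spec_digits2loc digits out) := by unfold Spec_digits2loc; infer_instance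

-- ===== CLAIM (what is proved, stated in full; the proofs are below) =====
def Claim_equal_digits2loc : Prop := ∀ (digits : List Int), Dom_digits2loc digits → Spec_digits2loc digits (digits2loc digits)

-- ===== LEMMAS AND PROOFS =====

-- Horner fold with an arbitrary accumulator.
theorem horner_foldl (l : List Int) (a : Int) :
    l.foldl (fun a d => a * 4 + d) a = a * 4 ^ l.length + l.foldl (fun a d => a * 4 + d) 0 := by
  induction l generalizing a with
  | nil => simp
  | cons d t ih =>
    simp only [List.foldl_cons, List.length_cons]
    rw [ih (a * 4 + d), ih (0 * 4 + d)]
    ring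

-- A's fold over the reversed list, characterised.
theorem afold_reverse (l : List Int) (i n m : Int) :
    l.reverse.foldl
      (fun (s : Int × Int × Int) d => (s.1 + s.2.2 * d, s.2.1 * 2, s.2.2 * 4)) (i, n, m)
    = (i + m * l.foldl (fun a d => a * 4 + d) 0, n * 2 ^ l.length, m * 4 ^ l.length) := by
  induction l generalizing i n m with
  | nil => simp
  | cons d t ih =>
    simp only [List.reverse_cons, List.foldl_append, List.foldl_cons, List.foldl_nil,
      List.length_cons]
    rw [ih]
    have h : (d :: t).foldl (fun a d => a * 4 + d) 0 = d * 4 ^ t.length + t.foldl (fun a d => a * 4 + d) 0 := by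
      simp only [List.foldl_cons]
      rw [horner_foldl t (0 * 4 + d)]; ring
    simp only [List.foldl_cons] at h ⊢
    rw [h]
    simp only [Prod.mk.injEq]
    refine ⟨by ring, by ring, by ring⟩

-- ===== VERDICT (by name: the statement is the Claim_ definition above) =====
theorem digits2loc_spec : Claim_equal_digits2loc := by
  intro digits _
  unfold Spec_digits2loc digits2loc digits2loc_alt
  simp only [afold_reverse digits 0 1 1, one_mul, zero_add]
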